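-- pv_equiv track=rewrite | github.com/hjjing123/CodeScope | backend/app/services/source_location_service.py | _likely_control_stmt
-- ===== SOURCE A (Python) =====
-- def _likely_control_stmt(line_text: str) -> bool:
--     stripped = str(line_text or "").strip().lower()
--     for keyword in (
--         "if",
--         "for",
--         "while",
--         "switch",
--         "catch",
--         "return",
--         "throw",
--         "new",
--         "else",
--     ):
--         if stripped.startswith(f"{keyword} ") or stripped.startswith(f"{keyword}("):
--             return True
--     return False
-- ===== SOURCE B (Python) =====
-- _KEYWORDS = {"if", "for", "while", "switch", "catch", "return", "throw", "new", "else"}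
--
--
-- def _likely_control_stmt(line_text: str) -> bool:
--     # One left-to-right scan: cut the leading token at the first delimiter
--     # (space or open parenthesis) and do a single set-membership test,
--     # instead of nine per-keyword prefix scans.
--     stripped = str(line_text or "").strip().lower()
--     for i, ch in enumerate(stripped):
--         if ch == " " or ch == "(":
--             return stripped[:i] in _KEYWORDS
--     return False
-- ===== Notes on version B (the rewrite author's own statement) =====
-- stated objective: idiomatic
-- what changed: Replaces the nine per-keyword startswith prefix scans with a single left-to-right scan that cuts the leading token at the first delimiter character (space or open parenthesis) and does one set-membership test.
import Mathlib
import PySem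

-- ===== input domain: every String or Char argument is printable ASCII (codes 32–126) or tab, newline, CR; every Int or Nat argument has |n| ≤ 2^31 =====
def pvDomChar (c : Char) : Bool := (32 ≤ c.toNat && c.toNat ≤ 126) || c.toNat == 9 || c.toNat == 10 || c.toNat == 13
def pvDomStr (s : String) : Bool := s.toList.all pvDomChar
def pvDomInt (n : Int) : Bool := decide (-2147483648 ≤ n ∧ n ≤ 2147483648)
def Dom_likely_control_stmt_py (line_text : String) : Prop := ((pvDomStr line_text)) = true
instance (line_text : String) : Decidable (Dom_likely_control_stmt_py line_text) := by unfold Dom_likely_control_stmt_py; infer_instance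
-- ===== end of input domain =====

-- B replaces A's nine per-keyword prefix scans by one scan that cuts the leading
-- token at the first delimiter (space or open parenthesis) and does one set-membership test (idiomatic).

-- ===== PORT A =====
-- A's for-loop over the keyword tuple with early return, as structural recursion.
def pvALoop (stripped : String) : List String → Bool
  | [] => false
  | kw :: rest =>
    if PySem.Str.startswith stripped (kw ++ " ") || PySem.Str.startswith stripped (kw ++ "(") then
      true
    else pvALoop stripped rest

-- str(line_text or "") is line_text itself for a str argument.
def likely_control_stmt_py (line_text : String) : Bool :=
  let stripped := PySem.Str.lower (PySem.Str.strip line_text)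
  pvALoop stripped ["if", "for", "while", "switch", "catch", "return", "throw", "new", "else"]

-- ===== PORT B =====
def pvKwSet : List (List Char) :=
  ["if", "for", "while", "switch", "catch", "return", "throw", "new", "else"].map String.toList

-- Source B's single scan: acc is the prefix stripped[:i] already passed.
def pvBLoop (acc : List Char) : List Char → Bool
  | [] => false
  | c :: rest =>
    if c = ' ' || c = '(' then pvKwSet.contains acc
    else pvBLoop (acc ++ [c]) rest

def likely_control_stmt_py_alt (line_text : String) : Bool :=
  pvBLoop [] (PySem.Str.lower (PySem.Str.strip line_text)).toList

-- ===== PRECONDITION & SPEC =====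
def Spec_likely_control_stmt_py (line_text : String) (out : Bool) : Prop := out = likely_control_stmt_py_alt line_text
instance (line_text : String) (out : Bool) : Decidable (Spec_likely_control_stmt_py line_text out) := by unfold Spec_likely_control_stmt_py; infer_instance

-- ===== CLAIM (what is proved, stated in full; the proofs are below) =====
def Claim_equal_likely_control_stmt_py : Prop := ∀ (line_text : String), Dom_likely_control_stmt_py line_text → Spec_likely_control_stmt_py line_text (likely_control_stmt_py line_text)

-- ===== LEMMAS AND PROOFS =====

-- a char-list mirror of A's loop, for the equivalence proof
def pvALoopL (cs : List Char) : List (List Char) → Bool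
  | [] => false
  | kw :: rest =>
    if (kw ++ [' ']).isPrefixOf cs || (kw ++ ['(']).isPrefixOf cs then true
    else pvALoopL cs rest

theorem pvALoop_eq_L (s : String) (K : List String) :
    pvALoop s K = pvALoopL s.toList (K.map String.toList) := by
  induction K with
  | nil => rfl
  | cons kw rest ih =>
    simp only [pvALoop, pvALoopL, List.map]
    have h1 : PySem.Str.startswith s (kw ++ " ") = (kw.toList ++ [' ']).isPrefixOf s.toList := by
      rw [Bool.eq_iff_iff, List.isPrefixOf_iff_prefix, PySem.Str.startswith_eq,
        PySem.Chars.startswith_iff]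
      simp
    have h2 : PySem.Str.startswith s (kw ++ "(") = (kw.toList ++ ['(']).isPrefixOf s.toList := by
      rw [Bool.eq_iff_iff, List.isPrefixOf_iff_prefix, PySem.Str.startswith_eq,
        PySem.Chars.startswith_iff]
      simp
    rw [h1, h2, ih]

def pvDelimFree (l : List Char) : Prop := ∀ x ∈ l, x ≠ ' ' ∧ x ≠ '('

theorem pvPrefix_false (l acc : List Char) (d : Char)
    (hd : d = ' ' ∨ d = '(') (hacc : pvDelimFree acc) :
    (l ++ [d]).isPrefixOf acc = false := by
  rw [Bool.eq_false_iff]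
  intro h
  rw [List.isPrefixOf_iff_prefix] at h
  have hd' : d ∈ acc := h.subset (by simp)
  rcases hd with rfl | rfl
  · exact (hacc _ hd').1 rfl
  · exact (hacc _ hd').2 rfl

theorem pvTest_delim (l : List Char) : ∀ (acc rest : List Char) (c : Char),
    pvDelimFree l → pvDelimFree acc → (c = ' ' ∨ c = '(') →
    ((l ++ [' ']).isPrefixOf (acc ++ c :: rest) || (l ++ ['(']).isPrefixOf (acc ++ c :: rest))
      = (l == acc) := by
  induction l with
  | nil =>
    intro acc rest c _ hacc hc
    cases acc with
    | nil =>
      rcases hc with rfl | rfl <;> simp [List.isPrefixOf]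
    | cons a acc' =>
      have ha := hacc a (by simp)
      simp [List.isPrefixOf, Ne.symm ha.1, Ne.symm ha.2]
  | cons x l' ih =>
    intro acc rest c hl hacc hc
    have hx := hl x (by simp)
    cases acc with
    | nil =>
      have hxc : (x == c) = false := by
        rcases hc with rfl | rfl
        · simp [hx.1]
        · simp [hx.2]
      simp [List.isPrefixOf, hxc]
    | cons a acc' =>
      have hIH := ih acc' rest c (fun y hy => hl y (by simp [hy]))
        (fun y hy => hacc y (by simp [hy])) hc
      simp only [List.cons_append, List.isPrefixOf, List.cons_beq_cons]
      cases hxa : (x == a) with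
      | false => simp
      | true => simp only [Bool.true_and, hIH]

theorem pvALoopL_nil (acc : List Char) (K : List (List Char)) (hacc : pvDelimFree acc) :
    pvALoopL acc K = false := by
  induction K with
  | nil => rfl
  | cons kw rest ih =>
    simp only [pvALoopL, pvPrefix_false kw acc ' ' (Or.inl rfl) hacc,
      pvPrefix_false kw acc '(' (Or.inr rfl) hacc, Bool.or_self, if_neg Bool.false_ne_true, ih]

theorem pvKwSet_delimFree : ∀ kw ∈ pvKwSet, pvDelimFree kw := by
  intro kw hkw
  simp only [pvKwSet, List.map, List.mem_cons, List.not_mem_nil, or_false] at hkw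
  rcases hkw with rfl|rfl|rfl|rfl|rfl|rfl|rfl|rfl|rfl <;>
    (intro x hx; simp at hx; rcases hx with rfl|rfl|rfl|rfl|rfl|rfl <;> decide)

theorem pvALoopL_delim (acc rest : List Char) (c : Char) (K : List (List Char))
    (hK : ∀ kw ∈ K, pvDelimFree kw) (hacc : pvDelimFree acc) (hc : c = ' ' ∨ c = '(') :
    pvALoopL (acc ++ c :: rest) K = K.contains acc := by
  induction K with
  | nil => rfl
  | cons kw K' ih =>
    have hkw := hK kw (List.mem_cons_self ..)
    simp only [pvALoopL, pvTest_delim kw acc rest c hkw hacc hc,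
      ih (fun k hk => hK k (List.mem_cons_of_mem _ hk)), List.contains_cons]
    by_cases h : kw = acc
    · subst h; simp
    · have : (kw == acc) = false := by simp [h]
      have : (acc == kw) = false := by simp [Ne.symm h]
      simp_all

theorem pvMain (cs : List Char) : ∀ acc, pvDelimFree acc →
    pvALoopL (acc ++ cs) pvKwSet = pvBLoop acc cs := by
  induction cs with
  | nil =>
    intro acc hacc
    simp only [List.append_nil, pvBLoop]
    exact pvALoopL_nil acc pvKwSet hacc
  | cons c rest ih =>
    intro acc hacc
    by_cases hc : c = ' ' ∨ c = '('
    · have hcb : (c = ' ' || c = '(') = true := by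
        rcases hc with h | h <;> simp [h]
      rw [pvBLoop, if_pos hcb,
        pvALoopL_delim acc rest c pvKwSet pvKwSet_delimFree hacc hc]
    · rw [not_or] at hc
      have hcb : (c = ' ' || c = '(') = false := by
        simp [hc.1, hc.2]
      rw [pvBLoop, if_neg (by simp [hcb]), ← ih (acc ++ [c])
        (fun x hx => by rcases List.mem_append.1 hx with h | h
                        · exact hacc x h
                        · simp at h; subst h; exact hc),
        List.append_cons]

-- ===== VERDICT (by name: the statement is the Claim_ definition above) =====
theorem likely_control_stmt_py_spec : Claim_equal_likely_control_stmt_py := by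
  intro s _
  show likely_control_stmt_py s = likely_control_stmt_py_alt s
  simp only [likely_control_stmt_py, likely_control_stmt_py_alt, pvALoop_eq_L]
  have h0 : pvDelimFree [] := fun x hx => absurd hx List.not_mem_nil
  have h1 := pvMain ((PySem.Str.lower (PySem.Str.strip s)).toList) [] h0
  simpa only [pvKwSet, List.nil_append] using h1
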